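-- pv_equiv track=rewrite | github.com/SamPav97/Game-of-Cols | Connect Four Final.py | place_player
-- ===== SOURCE A (Python) =====
-- class FullColError(Exception):
--     pass
--
-- def place_player(play_num, col_choice, mat):
--     # Add the player number to the matrix on the requested column and return error if that col is full.
--     row_inner = len(mat)
--     # Go through the column until we get zero. Start bottom-up.
--     for row_ind in range(row_inner - 1, -1, -1):
--         current_el = mat[row_ind][col_choice]
--         if current_el == 0:
--             # As soon as we get zero, we turn the zero to the player number and return current row col.
--             mat[row_ind][col_choice] = play_num
--             return row_ind, col_choice
--     # If column full:
--     raise FullColError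
-- ===== SOURCE B (Python) =====
-- class FullColError(Exception):
--     pass
--
-- def place_player(play_num, col_choice, mat):
--     # Collect every row index whose slot in the chosen column is empty,
--     # then drop the token into the bottommost (largest) one.
--     zeros = [i for i, row in enumerate(mat) if row[col_choice] == 0]
--     if not zeros:
--         raise FullColError
--     r = zeros[-1]
--     mat[r][col_choice] = play_num
--     return r, col_choice
-- ===== Notes on version B (the rewrite author's own statement) =====
-- stated objective: alternative
-- what changed: B replaces A's bottom-up early-return scan with a gather-then-select pass over the whole column (enumerate + comprehension, take the last empty index); Pre_ excludes ragged matrices where col_choice is out of range for some row above the bottommost empty slot, which A's bottom-up early exit happens never to touch but B's full pass indexes (IndexError).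
-- outside the precondition, e.g. on place_player(1, 1, [[5], [0, 0]]): A returns (1, 1), B raises IndexError
import Mathlib
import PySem

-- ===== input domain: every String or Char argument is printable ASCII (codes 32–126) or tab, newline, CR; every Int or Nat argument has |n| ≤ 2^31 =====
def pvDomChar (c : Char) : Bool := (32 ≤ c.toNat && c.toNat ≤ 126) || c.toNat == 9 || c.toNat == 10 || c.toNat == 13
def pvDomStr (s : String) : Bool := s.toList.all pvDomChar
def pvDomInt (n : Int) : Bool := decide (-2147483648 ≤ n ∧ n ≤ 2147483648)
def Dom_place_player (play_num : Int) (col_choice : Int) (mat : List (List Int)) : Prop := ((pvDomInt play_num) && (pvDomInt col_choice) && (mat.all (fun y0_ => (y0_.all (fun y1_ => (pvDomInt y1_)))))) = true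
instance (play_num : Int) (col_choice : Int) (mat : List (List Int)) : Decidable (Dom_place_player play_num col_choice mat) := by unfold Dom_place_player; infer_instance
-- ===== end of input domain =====

-- B replaces A's bottom-up early-return scan by a gather-then-pick-bottommost pass (equal cost);
-- the equivalence proved is about the RETURN value only — both Pythons also mutate mat identically
-- (they write play_num into the same cell) where they return.

-- ===== PORT A =====
-- Python's 'for row_ind in range(n-1,-1,-1)' as structural countdown recursion; the pair (-1,-1)
-- stands for the raising exits (IndexError / FullColError), which Pre_ excludes.
def placeALoop (play_num : Int) (col_choice : Int) (mat : List (List Int)) : Nat → Int × Int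
  | 0 => (-1, -1)
  | k + 1 =>
    match PySem.List.pyGet? mat (k : Int) with
    | none => (-1, -1)
    | some row =>
      match PySem.List.pyGet? row col_choice with
      | none => (-1, -1)
      | some v => if v = 0 then ((k : Int), col_choice) else placeALoop play_num col_choice mat k

def place_player (play_num : Int) (col_choice : Int) (mat : List (List Int)) : Int × Int :=
  placeALoop play_num col_choice mat mat.length

-- ===== PORT B =====
-- B's comprehension indexes row[col_choice] bare; pyGet? = none marks its IndexError, which Pre_
-- excludes (inside Pre_ every row's index is valid, so the filter is exactly B's comprehension).
def place_player_alt (play_num : Int) (col_choice : Int) (mat : List (List Int)) : Int × Int :=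
  let zeros := ((PySem.List.enumerate mat).filter
      (fun p => PySem.List.pyGet? p.2 col_choice == some 0)).map Prod.fst
  match zeros.getLast? with
  | some r => (r, col_choice)
  | none => (-1, -1)  -- FullColError, outside Pre_

-- ===== PRECONDITION & SPEC =====
-- Pre_ excludes, besides the inputs where A raises (no reachable zero: FullColError, or a bad index
-- on a scanned row: IndexError), the ragged matrices where col_choice is out of range for some row
-- ABOVE the bottommost zero: A's bottom-up early exit never touches those rows, while B's full pass
-- indexes them and raises IndexError.
def Pre_place_player (play_num : Int) (col_choice : Int) (mat : List (List Int)) : Prop :=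
  (∀ j < mat.length, PySem.List.pyGet? (mat.getD j []) col_choice ≠ none) ∧
  ∃ i < mat.length,
    PySem.List.pyGet? (mat.getD i []) col_choice = some 0 ∧
    ∀ j < mat.length, i < j →
      PySem.List.pyGet? (mat.getD j []) col_choice ≠ some 0
instance (play_num : Int) (col_choice : Int) (mat : List (List Int)) : Decidable (Pre_place_player play_num col_choice mat) := by unfold Pre_place_player; infer_instance

def pvWitness_place_player : Int × Int × List (List Int) := (1, 0, [[1, 2], [0, 1]])

def Spec_place_player (play_num : Int) (col_choice : Int) (mat : List (List Int)) (out : Int × Int) : Prop := out = place_player_alt play_num col_choice mat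
instance (play_num : Int) (col_choice : Int) (mat : List (List Int)) (out : Int × Int) : Decidable (Spec_place_player play_num col_choice mat out) := by unfold Spec_place_player; infer_instance

-- ===== CLAIM (what is proved, stated in full; the proofs are below) =====
def Claim_equal_place_player : Prop := ∀ (play_num : Int) (col_choice : Int) (mat : List (List Int)), Dom_place_player play_num col_choice mat → Pre_place_player play_num col_choice mat → Spec_place_player play_num col_choice mat (place_player play_num col_choice mat)

-- ===== LEMMAS AND PROOFS =====

-- A's countdown loop lands on the bottommost zero.
lemma placeALoop_eq (play_num col_choice : Int) (mat : List (List Int)) (i : Nat)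
    (hi : i < mat.length)
    (h0 : PySem.List.pyGet? (mat.getD i []) col_choice = some 0)
    (hvalid : ∀ j < mat.length, PySem.List.pyGet? (mat.getD j []) col_choice ≠ none)
    (hup : ∀ j < mat.length, i < j →
      PySem.List.pyGet? (mat.getD j []) col_choice ≠ some 0) :
    ∀ k, i < k → k ≤ mat.length →
      placeALoop play_num col_choice mat k = ((i : Int), col_choice) := by
  intro k
  induction k with
  | zero => omega
  | succ k ih =>
    intro hik hkle
    have hk : k < mat.length := by omega
    have hget : PySem.List.pyGet? mat (k : Int) = some (mat.getD k []) := by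
      simp [PySem.List.pyGet?_natCast, List.getD_eq_getElem?_getD, List.getElem?_eq_getElem hk]
    by_cases hik' : i = k
    · subst hik'
      have h0' : PySem.List.pyGet? (mat[i]?.getD []) col_choice = some 0 := by
        rwa [List.getD_eq_getElem?_getD] at h0
      simp [placeALoop, hget, h0']
    · have hlt : i < k := by omega
      have hnn := hvalid k hk
      have hns := hup k hk hlt
      cases hv : PySem.List.pyGet? (mat.getD k []) col_choice with
      | none => exact absurd hv hnn
      | some v =>
        have hvne : v ≠ 0 := by rintro rfl; exact hns hv
        have hv' : PySem.List.pyGet? (mat[k]?.getD []) col_choice = some v := by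
          rwa [List.getD_eq_getElem?_getD] at hv
        simp only [placeALoop, hget]
        simp [hv', hvne]
        exact ih hlt (by omega)

-- No row of l has a zero in the column → the filtered enumeration is empty.
lemma filter_enum_nil (col_choice : Int) :
    ∀ (l : List (List Int)) (s : Int),
      (∀ x ∈ l, PySem.List.pyGet? x col_choice ≠ some 0) →
      (PySem.List.enumerate l s).filter
        (fun p => PySem.List.pyGet? p.2 col_choice == some 0) = [] := by
  intro l
  induction l with
  | nil => intro s _; simp [PySem.List.enumerate_nil]
  | cons a t ih =>
    intro s h
    have ha := h a (by simp)
    simp [PySem.List.enumerate_cons, ha,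
      ih (s + 1) (fun x hx => h x (by simp [hx]))]

-- The last collected index is the bottommost zero.
lemma zeros_getLast (col_choice : Int) :
    ∀ (l : List (List Int)) (s : Int) (i : Nat),
      i < l.length →
      PySem.List.pyGet? (l.getD i []) col_choice = some 0 →
      (∀ j < l.length, i < j → PySem.List.pyGet? (l.getD j []) col_choice ≠ some 0) →
      (((PySem.List.enumerate l s).filter
          (fun p => PySem.List.pyGet? p.2 col_choice == some 0)).map Prod.fst).getLast?
        = some (s + i) := by
  intro l
  induction l with
  | nil => intro s i hi; simp at hi
  | cons a t ih =>
    intro s i hi h0 hup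
    cases i with
    | zero =>
      have ha : PySem.List.pyGet? a col_choice = some 0 := by simpa using h0
      have htnil : (PySem.List.enumerate t (s + 1)).filter
          (fun p => PySem.List.pyGet? p.2 col_choice == some 0) = [] := by
        apply filter_enum_nil
        intro x hx
        obtain ⟨j, hj, rfl⟩ := List.mem_iff_getElem.mp hx
        have := hup (j + 1) (by simp; omega) (by omega)
        simpa [List.getD_eq_getElem?_getD, List.getElem?_eq_getElem hj] using this
      simp [PySem.List.enumerate_cons, ha, htnil]
    | succ k =>
      have hk : k < t.length := by simpa using hi
      have h0' : PySem.List.pyGet? (t.getD k []) col_choice = some 0 := by simpa using h0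
      have hup' : ∀ j < t.length, k < j →
          PySem.List.pyGet? (t.getD j []) col_choice ≠ some 0 := by
        intro j hj hkj
        have := hup (j + 1) (by simp; omega) (by omega)
        simpa using this
      have htail := ih (s + 1) k hk h0' hup'
      have hz : (s + 1) + (k : Int) = s + ((k : Nat) + 1 : Nat) := by push_cast; ring
      rw [hz] at htail
      set zs := ((PySem.List.enumerate t (s + 1)).filter
          (fun p => PySem.List.pyGet? p.2 col_choice == some 0)).map Prod.fst with hzs
      have hzne : zs ≠ [] := by
        intro hnil; rw [hnil] at htail; simp at htail
      obtain ⟨z, zt, hzz⟩ := List.exists_cons_of_ne_nil hzne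
      by_cases ha : PySem.List.pyGet? a col_choice = some 0
      · have ha' : (PySem.List.pyGet? a col_choice == some 0) = true := by simp [ha]
        simp only [PySem.List.enumerate_cons, List.filter_cons, ha', if_true, List.map_cons, ← hzs]
        rw [hzz, List.getLast?_cons_cons, ← hzz]
        exact htail
      · have ha' : (PySem.List.pyGet? a col_choice == some 0) = false := by simp [ha]
        simp only [PySem.List.enumerate_cons, List.filter_cons, ha', ← hzs]
        exact htail

-- ===== VERDICT (by name: the statement is the Claim_ definition above) =====
theorem place_player_spec : Claim_equal_place_player := by
  intro play_num col_choice mat _ hpre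
  obtain ⟨hvalid, i, hi, h0, hup⟩ := hpre
  unfold Spec_place_player place_player place_player_alt
  have hA := placeALoop_eq play_num col_choice mat i hi h0 hvalid hup mat.length hi le_rfl
  have hB := zeros_getLast col_choice mat 0 i hi h0 hup
  rw [hA]
  simp only [hB]
  simp
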